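-- pv_equiv track=rewrite | github.com/HyenaSeba/My-lessons-in-Hillel | Lesson 9 homework.py | updated_list
-- ===== SOURCE A (Python) =====
-- def updated_list(input_list):
--     my_list_en = enumerate(input_list)
--     new_list = []
--     for i, k in my_list_en:
--         if i % 2 != 0:                # or i % 2 == 0 -- I still don't get how we decide which numbers are even in python.
--             new_list.append(k[::-1])
--         else:
--             new_list.append(k)
--     return new_list
-- ===== SOURCE B (Python) =====
-- def updated_list(input_list):
--     out = []
--     i = 0
--     n = len(input_list)
--     while i + 1 < n:
--         out.append(input_list[i])
--         out.append(input_list[i + 1][::-1])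
--         i += 2
--     if i < n:
--         out.append(input_list[i])
--     return out
-- ===== Notes on version B (the rewrite author's own statement) =====
-- stated objective: alternative
-- what changed: Replaces the enumerate loop with its per-element parity test by an index loop that strides two elements at a time (copy even element, append reversed odd element), so no index parity is ever computed.
import Mathlib
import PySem

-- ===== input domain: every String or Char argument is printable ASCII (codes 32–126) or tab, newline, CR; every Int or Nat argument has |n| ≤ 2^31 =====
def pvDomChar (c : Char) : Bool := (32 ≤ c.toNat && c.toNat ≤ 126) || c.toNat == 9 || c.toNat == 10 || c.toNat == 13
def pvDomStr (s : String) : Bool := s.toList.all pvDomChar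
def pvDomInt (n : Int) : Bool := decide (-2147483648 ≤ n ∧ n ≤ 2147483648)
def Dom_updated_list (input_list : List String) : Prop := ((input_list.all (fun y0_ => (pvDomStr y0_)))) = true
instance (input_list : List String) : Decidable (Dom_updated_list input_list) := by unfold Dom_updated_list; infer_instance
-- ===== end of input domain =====

-- B is an alternative decomposition: a stride-two index loop (copy even element, append reversed odd element) instead of an enumerate loop with a parity test; equal return value.

-- s[::-1]  (slice with step -1 never fails, so the `some` is unwrapped with getD)
def pyRevStr (s : String) : String := (PySem.Str.slice? s none none (-1)).getD s

-- ===== PORT A =====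
def updated_list (input_list : List String) : List String :=
  (PySem.List.enumerate input_list 0).foldl
    (fun new_list ik =>
      if ik.1 % 2 ≠ 0 then new_list ++ [pyRevStr ik.2] else new_list ++ [ik.2])
    []

-- ===== PORT B =====
-- the while loop of Source B: state (i, out); input_list[i] is in range whenever read, so pyGetD's default is never used
def updated_list_alt_loop (l : List String) (i : Nat) (out : List String) : List String :=
  if i + 1 < l.length then
    updated_list_alt_loop l (i + 2)
      (out ++ [PySem.List.pyGetD l (i : Int) "", pyRevStr (PySem.List.pyGetD l ((i : Int) + 1) "")])
  else if i < l.length then out ++ [PySem.List.pyGetD l (i : Int) ""]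
  else out
termination_by l.length - i

def updated_list_alt (input_list : List String) : List String :=
  updated_list_alt_loop input_list 0 []

-- ===== PRECONDITION & SPEC =====
def Spec_updated_list (input_list : List String) (out : List String) : Prop := out = updated_list_alt input_list
instance (input_list : List String) (out : List String) : Decidable (Spec_updated_list input_list out) := by unfold Spec_updated_list; infer_instance

-- ===== CLAIM (what is proved, stated in full; the proofs are below) =====
def Claim_equal_updated_list : Prop := ∀ (input_list : List String), Dom_updated_list input_list → Spec_updated_list input_list (updated_list input_list)

-- ===== LEMMAS AND PROOFS =====

-- proof-side reference function: reverse every odd-positioned element, two elements at a time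
def pairs : List String → List String
  | [] => []
  | [a] => [a]
  | a :: b :: rest => a :: pyRevStr b :: pairs rest

-- A's loop only appends, so its foldl is the map of its step over the enumerated list.
theorem foldA_eq_map (ps : List (Int × String)) (acc : List String) :
    ps.foldl (fun new_list ik =>
      if ik.1 % 2 ≠ 0 then new_list ++ [pyRevStr ik.2] else new_list ++ [ik.2]) acc
    = acc ++ ps.map (fun ik => if ik.1 % 2 ≠ 0 then pyRevStr ik.2 else ik.2) := by
  induction ps generalizing acc with
  | nil => simp
  | cons p ps ih =>
    rw [List.foldl_cons, ih, List.map_cons]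
    split <;> simp

theorem map_enum_eq_pairs (l : List String) (n : Int) (hn : n % 2 = 0) :
    (PySem.List.enumerate l n).map (fun ik => if ik.1 % 2 ≠ 0 then pyRevStr ik.2 else ik.2)
    = pairs l := by
  induction l using pairs.induct generalizing n with
  | case1 => simp [PySem.List.enumerate_nil, pairs]
  | case2 a => simp [PySem.List.enumerate_cons, PySem.List.enumerate_nil, pairs, hn]
  | case3 a b rest ih =>
    have h1 : (n + 1) % 2 ≠ 0 := by omega
    have h2 : (n + 1 + 1) % 2 = 0 := by omega
    rw [PySem.List.enumerate_cons, PySem.List.enumerate_cons, List.map_cons, List.map_cons,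
      ih _ h2, pairs]
    simp [hn, h1]

theorem alt_loop_eq_pairs (l : List String) (i : Nat) (out : List String) :
    updated_list_alt_loop l i out = out ++ pairs (l.drop i) := by
  induction i, out using updated_list_alt_loop.induct (l := l) with
  | case1 i out h ih =>
    rw [updated_list_alt_loop, if_pos h, ih]
    have hi : i < l.length := by omega
    have hi1 : i + 1 < l.length := h
    have hd : l.drop i = l[i] :: l[i + 1] :: l.drop (i + 2) := by
      rw [List.drop_eq_getElem_cons hi, List.drop_eq_getElem_cons hi1]
    have g1 : PySem.List.pyGetD l (i : Int) "" = l[i] := by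
      simp [PySem.List.pyGetD_natCast, List.getD, hi]
    have g2 : PySem.List.pyGetD l ((i : Int) + 1) "" = l[i + 1] := by
      rw [show ((i : Int) + 1) = ((i + 1 : Nat) : Int) by push_cast; ring,
        PySem.List.pyGetD_natCast]
      simp [List.getD, hi1]
    rw [hd, g1, g2, pairs]
    simp
  | case2 i out h h' =>
    rw [updated_list_alt_loop, if_neg h, if_pos h']
    have hd : l.drop i = l[i] :: l.drop (i + 1) := List.drop_eq_getElem_cons h'
    have hnil : l.drop (i + 1) = [] := List.drop_eq_nil_of_le (by omega)
    have g1 : PySem.List.pyGetD l (i : Int) "" = l[i] := by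
      simp [PySem.List.pyGetD_natCast, List.getD, h']
    simp [hd, hnil, pairs, g1]
  | case3 i out h h' =>
    rw [updated_list_alt_loop, if_neg h, if_neg h']
    have : l.drop i = [] := List.drop_eq_nil_of_le (by omega)
    simp [this, pairs]

-- ===== VERDICT (by name: the statement is the Claim_ definition above) =====
theorem updated_list_spec : Claim_equal_updated_list := by
  intro l _
  show updated_list l = updated_list_alt l
  rw [updated_list, foldA_eq_map, List.nil_append, map_enum_eq_pairs l 0 rfl,
    updated_list_alt, alt_loop_eq_pairs, List.drop_zero, List.nil_append]
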